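-- pv_equiv track=rewrite | github.com/khuushichand/aiml-project | tldw_Server_API/tests/e2e/fixtures.py | _looks_like_jwt
-- ===== SOURCE A (Python) =====
-- def _looks_like_jwt(token: str) -> bool:
--     if not isinstance(token, str):
--         return False
--     token = token.strip()
--     if not token:
--         return False
--     parts = token.split(".")
--     if len(parts) != 3:
--         return False
--     return all(part for part in parts)
-- ===== SOURCE B (Python) =====
-- def _looks_like_jwt(token: str) -> bool:
--     if not isinstance(token, str):
--         return False
--     token = token.strip()
--     return (token.count(".") == 2 and ".." not in token
--             and not token.startswith(".") and not token.endswith("."))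
-- ===== Notes on version B (the rewrite author's own statement) =====
-- stated objective: simpler
-- what changed: Instead of building the list of dot-separated parts and checking its length and element non-emptiness, B decides the JWT shape directly from the string's dot structure: exactly two dots, no adjacent dots, no leading or trailing dot.
import Mathlib
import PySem

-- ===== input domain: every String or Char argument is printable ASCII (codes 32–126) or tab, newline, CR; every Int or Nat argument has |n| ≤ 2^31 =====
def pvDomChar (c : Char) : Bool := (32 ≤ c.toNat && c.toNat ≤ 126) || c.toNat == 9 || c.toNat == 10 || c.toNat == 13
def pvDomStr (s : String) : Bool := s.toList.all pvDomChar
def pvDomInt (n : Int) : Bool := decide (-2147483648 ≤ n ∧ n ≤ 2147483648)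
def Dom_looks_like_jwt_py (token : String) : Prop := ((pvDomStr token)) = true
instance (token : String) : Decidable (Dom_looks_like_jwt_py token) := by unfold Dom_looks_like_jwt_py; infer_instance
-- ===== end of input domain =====

-- B checks the dot structure of the stripped token directly (two dots, none adjacent,
-- none at either end) instead of splitting into a parts list; objective: simpler.

-- ===== PORT A =====
def looks_like_jwt_py (token : String) : Bool :=
  let t := PySem.Chars.strip token.toList
  if t.isEmpty then false
  else
    let parts := PySem.Chars.splitOn t ['.']
    if parts.length != 3 then false
    else parts.all (fun p => !p.isEmpty)

-- ===== PORT B =====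
def looks_like_jwt_py_alt (token : String) : Bool :=
  let t := PySem.Chars.strip token.toList
  (PySem.Chars.count t ['.'] == 2) && !(PySem.Chars.isIn ['.', '.'] t)
    && !(PySem.Chars.startswith t ['.']) && !(PySem.Chars.endswith t ['.'])

-- ===== PRECONDITION & SPEC =====
def Spec_looks_like_jwt_py (token : String) (out : Bool) : Prop := out = looks_like_jwt_py_alt token
instance (token : String) (out : Bool) : Decidable (Spec_looks_like_jwt_py token out) := by unfold Spec_looks_like_jwt_py; infer_instance

-- ===== CLAIM (what is proved, stated in full; the proofs are below) =====
def Claim_equal_looks_like_jwt_py : Prop := ∀ (token : String), Dom_looks_like_jwt_py token → Spec_looks_like_jwt_py token (looks_like_jwt_py token)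

-- ===== LEMMAS AND PROOFS =====

-- Structural version of splitting on '.', used only in the proofs.
def dotSplit : List Char → List Char → List (List Char)
  | [], cur => [cur.reverse]
  | x :: rest, cur => if x = '.' then cur.reverse :: dotSplit rest [] else dotSplit rest (x :: cur)

theorem splitOn_go_eq (fuel : Nat) (l cur : List Char) (acc : List (List Char))
    (h : l.length ≤ fuel) :
    PySem.Chars.splitOn.go ['.'] fuel l cur acc = acc.reverse ++ dotSplit l cur := by
  induction fuel generalizing l cur acc with
  | zero =>
    have hl : l = [] := by cases l <;> simp_all
    subst hl
    simp [PySem.Chars.splitOn.go, dotSplit]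
  | succ f ih =>
    cases l with
    | nil => simp [PySem.Chars.splitOn.go, dotSplit]
    | cons x rest =>
      by_cases hx : x = '.'
      · subst hx
        simp only [PySem.Chars.splitOn.go, List.isPrefixOf, BEq.rfl, Bool.true_and,
          if_pos, List.length_cons, List.drop_succ_cons]
        simp only [List.length_nil, List.drop_zero]
        rw [ih rest [] (cur.reverse :: acc) (by simpa using Nat.le_of_succ_le_succ h)]
        simp [dotSplit]
      · have hpre : List.isPrefixOf ['.'] (x :: rest) = false := by
          simp [List.isPrefixOf]; exact fun hh => (hx hh.symm).elim
        simp only [PySem.Chars.splitOn.go, hpre, Bool.false_eq_true, if_false]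
        rw [ih rest (x :: cur) acc (by simpa using Nat.le_of_succ_le_succ h)]
        simp [dotSplit, hx]

theorem count_go_eq (fuel : Nat) (l : List Char) (acc : Nat) (h : l.length ≤ fuel) :
    PySem.Chars.count.go ['.'] fuel l acc = acc + l.count '.' := by
  induction fuel generalizing l acc with
  | zero =>
    have hl : l = [] := by cases l <;> simp_all
    subst hl; simp [PySem.Chars.count.go]
  | succ f ih =>
    cases l with
    | nil => simp [PySem.Chars.count.go]
    | cons x rest =>
      by_cases hx : x = '.'
      · subst hx
        simp only [PySem.Chars.count.go, List.isPrefixOf, BEq.rfl, Bool.true_and,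
          if_pos, List.length_cons, List.drop_succ_cons]
        simp only [List.length_nil, List.drop_zero]
        rw [ih rest (acc + 1) (by simpa using Nat.le_of_succ_le_succ h)]
        simp [List.count_cons]; omega
      · have hpre : List.isPrefixOf ['.'] (x :: rest) = false := by
          simp [List.isPrefixOf]; exact fun hh => (hx hh.symm).elim
        simp only [PySem.Chars.count.go, hpre, Bool.false_eq_true, if_false]
        rw [ih rest acc (by simpa using Nat.le_of_succ_le_succ h)]
        simp [List.count_cons, hx]

theorem length_dotSplit (l cur : List Char) :
    (dotSplit l cur).length = l.count '.' + 1 := by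
  induction l generalizing cur with
  | nil => simp [dotSplit]
  | cons x rest ih =>
    by_cases hx : x = '.'
    · subst hx; simp [dotSplit, ih, List.count_cons]
    · simp [dotSplit, hx, ih, List.count_cons]

theorem dotSplit_nodot (a cur : List Char) (h : '.' ∉ a) :
    dotSplit a cur = [cur.reverse ++ a] := by
  induction a generalizing cur with
  | nil => simp [dotSplit]
  | cons x rest ih =>
    have hx : x ≠ '.' := fun hh => h (hh ▸ List.mem_cons_self)
    simp only [dotSplit, hx, if_false]
    rw [ih (x :: cur) (fun hm => h (List.mem_cons_of_mem _ hm))]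
    simp

theorem dotSplit_app (a rest cur : List Char) (h : '.' ∉ a) :
    dotSplit (a ++ '.' :: rest) cur = (cur.reverse ++ a) :: dotSplit rest [] := by
  induction a generalizing cur with
  | nil => simp [dotSplit]
  | cons x t ih =>
    have hx : x ≠ '.' := fun hh => h (hh ▸ List.mem_cons_self)
    simp only [List.cons_append, dotSplit, hx, if_false]
    rw [ih (x :: cur) (fun hm => h (List.mem_cons_of_mem _ hm))]
    simp

theorem split_first_dot (l : List Char) (h : '.' ∈ l) :
    ∃ a rest, l = a ++ '.' :: rest ∧ '.' ∉ a ∧ l.count '.' = rest.count '.' + 1 := by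
  induction l with
  | nil => simp at h
  | cons x t ih =>
    by_cases hx : x = '.'
    · exact ⟨[], t, by simp [hx], by simp, by simp [hx, List.count_cons]⟩
    · have ht : '.' ∈ t := by
        cases List.mem_cons.1 h with
        | inl h1 => exact absurd h1.symm hx
        | inr h1 => exact h1
      obtain ⟨a, rest, he, hna, hc⟩ := ih ht
      exact ⟨x :: a, rest, by simp [he], by simp [hna, Ne.symm hx, hx], by
        simp [hx, hc]⟩

theorem decomp_two (l : List Char) (h : l.count '.' = 2) :
    ∃ a b d, l = a ++ '.' :: (b ++ '.' :: d) ∧ '.' ∉ a ∧ '.' ∉ b ∧ '.' ∉ d := by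
  have h1 : '.' ∈ l := List.count_pos_iff.1 (by omega)
  obtain ⟨a, rest, he, hna, hc⟩ := split_first_dot l h1
  have h2 : '.' ∈ rest := List.count_pos_iff.1 (by omega)
  obtain ⟨b, d, he2, hnb, hc2⟩ := split_first_dot rest h2
  have hnd : '.' ∉ d := by
    intro hm
    have := List.count_pos_iff.2 hm
    omega
  exact ⟨a, b, d, by rw [he, he2], hna, hnb, hnd⟩

theorem infix_dd_drop (u v : List Char) (h : '.' ∉ u) :
    (['.', '.'] <:+: u ++ v) ↔ (['.', '.'] <:+: v) := by
  induction u with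
  | nil => simp
  | cons x t ih =>
    have hx : x ≠ '.' := fun hh => h (hh ▸ List.mem_cons_self)
    rw [List.cons_append, List.infix_cons_iff, ih (fun hm => h (List.mem_cons_of_mem _ hm))]
    constructor
    · rintro (hp | hi)
      · exact absurd (List.cons_prefix_cons.1 hp).1.symm hx
      · exact hi
    · exact Or.inr

theorem not_infix_dd_of_nodot (d : List Char) (h : '.' ∉ d) : ¬ ['.', '.'] <:+: d := by
  intro hi
  have := hi.sublist.count_le '.'
  simp at this
  exact absurd (List.count_pos_iff.1 (by omega)) h

theorem prefix_dd_cons_iff (b d : List Char) (hb : '.' ∉ b) :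
    (['.', '.'] <+: '.' :: (b ++ '.' :: d)) ↔ b = [] := by
  cases b with
  | nil => simp
  | cons x t =>
    have hx : x ≠ '.' := fun hh => hb (hh ▸ List.mem_cons_self)
    constructor
    · intro hp
      have := (List.cons_prefix_cons.1 (List.cons_prefix_cons.1 hp).2).1
      exact absurd this.symm hx
    · intro hh; simp at hh

theorem infix_dd_iff (a b d : List Char) (ha : '.' ∉ a) (hb : '.' ∉ b) (hd : '.' ∉ d) :
    (['.', '.'] <:+: a ++ '.' :: (b ++ '.' :: d)) ↔ b = [] := by
  rw [infix_dd_drop a _ ha, List.infix_cons_iff, prefix_dd_cons_iff b d hb,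
    infix_dd_drop b _ hb, List.infix_cons_iff]
  constructor
  · rintro (h1 | h2 | h3)
    · exact h1
    · cases d with
      | nil => simp at h2
      | cons y t =>
        have hy : y ≠ '.' := fun hh => hd (hh ▸ List.mem_cons_self)
        exact absurd (List.cons_prefix_cons.1 (List.cons_prefix_cons.1 h2).2).1.symm hy
    · exact absurd h3 (not_infix_dd_of_nodot d hd)
  · exact Or.inl

theorem isPrefixOf_dot (a r : List Char) (ha : '.' ∉ a) :
    List.isPrefixOf ['.'] (a ++ '.' :: r) = a.isEmpty := by
  cases a with
  | nil => simp [List.isPrefixOf]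
  | cons x t =>
    have hx : x ≠ '.' := fun hh => ha (hh ▸ List.mem_cons_self)
    simp [List.isPrefixOf]
    exact fun hh => (hx hh.symm).elim

-- the shared computation on the stripped character list
theorem core_eq (l : List Char) :
    (if l.isEmpty then false
     else if (dotSplit l []).length != 3 then false
     else (dotSplit l []).all (fun p => !p.isEmpty))
    = ((l.count '.' == 2) && !(PySem.Chars.isIn ['.', '.'] l)
        && !(List.isPrefixOf ['.'] l) && !(List.isPrefixOf ['.'] l.reverse)) := by
  by_cases hc : l.count '.' = 2
  · obtain ⟨a, b, d, he, ha, hb, hd⟩ := decomp_two l hc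
    subst he
    have hsplit : dotSplit (a ++ '.' :: (b ++ '.' :: d)) [] = [a, b, d] := by
      rw [dotSplit_app _ _ _ ha]
      rw [dotSplit_app _ _ _ hb]
      rw [dotSplit_nodot _ _ hd]
      simp
    have hempty : (a ++ '.' :: (b ++ '.' :: d)).isEmpty = false := by simp
    have hin : PySem.Chars.isIn ['.', '.'] (a ++ '.' :: (b ++ '.' :: d)) = b.isEmpty := by
      by_cases hbe : b = []
      · subst hbe
        have h2 : ['.', '.'] <:+: a ++ '.' :: '.' :: d := by
          simpa using (infix_dd_iff a [] d ha (by simp) hd).2 rfl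
        simp [(PySem.Chars.isIn_iff_infix _ _).2 h2]
      · have : ¬ ['.', '.'] <:+: a ++ '.' :: (b ++ '.' :: d) :=
          fun hh => hbe ((infix_dd_iff a b d ha hb hd).1 hh)
        rw [(PySem.Chars.isIn_eq_false_iff _ _).2 this]
        simp [hbe]
    have hpref : List.isPrefixOf ['.'] (a ++ '.' :: (b ++ '.' :: d)) = a.isEmpty :=
      isPrefixOf_dot a _ ha
    have hrev : (a ++ '.' :: (b ++ '.' :: d)).reverse
        = d.reverse ++ '.' :: (b.reverse ++ '.' :: a.reverse) := by
      simp
    have hsuf : List.isPrefixOf ['.'] (a ++ '.' :: (b ++ '.' :: d)).reverse = d.isEmpty := by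
      rw [hrev, isPrefixOf_dot _ _ (by simpa using hd)]
      simp
    rw [hsplit] at *
    simp only [hempty, hc, hin, hpref, hsuf, Bool.false_eq_true, if_false,
      List.length_cons, List.length_nil]
    norm_num
    cases a <;> cases b <;> cases d <;> simp
  · have hlen : (dotSplit l []).length ≠ 3 := by
      rw [length_dotSplit]; omega
    have hc2 : (l.count '.' == 2) = false := by simpa using hc
    simp only [hc2, Bool.false_and]
    by_cases he : l.isEmpty
    · simp [he]
    · simp only [he, Bool.false_eq_true, if_false]
      have : ((dotSplit l []).length != 3) = true := by simpa using hlen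
      simp [this]

-- ===== VERDICT (by name: the statement is the Claim_ definition above) =====
theorem looks_like_jwt_py_spec : Claim_equal_looks_like_jwt_py := by
  intro token _
  unfold Spec_looks_like_jwt_py looks_like_jwt_py looks_like_jwt_py_alt
  set l := PySem.Chars.strip token.toList with hl
  have hsplit : PySem.Chars.splitOn l ['.'] = dotSplit l [] := by
    have := splitOn_go_eq (l.length + 1) l [] [] (by omega)
    simpa [PySem.Chars.splitOn] using this
  have hcount : PySem.Chars.count l ['.'] = l.count '.' := by
    have := count_go_eq l.length l 0 (by omega)
    simpa [PySem.Chars.count] using this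
  simp only [hsplit, hcount, PySem.Chars.startswith, PySem.Chars.endswith, List.isSuffixOf]
  have := core_eq l
  simpa using this
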